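-- pv_equiv track=rewrite | github.com/diegopastor/competitiveProgramming | Misc./CF001/C.py | singleDigitGeneratedNumber
-- ===== SOURCE A (Python) =====
-- def singleDigitGeneratedNumber(L,R):
--     singleDigitNumbers = []
--     total = 0
--     for number in range(L,R):
--         if isSingleDigit(number):
--             singleDigitNumbers.append(number)
--     for singleDigitNumber in singleDigitNumbers:
--         total = total + int(singleDigitNumber)
--     return total
--
-- def isSingleDigit(number):
--     numbersList = []
--     counter = 0
--     number = str(number)
--     for digit in number:
--         numbersList.append(digit)
--     firstDigit = numbersList[0]
--     for char in numbersList: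
--         if char == firstDigit:
--             counter = counter + 1
--     if counter == len(numbersList):
--         return True
--     else:
--         return False
-- ===== SOURCE B (Python) =====
-- def singleDigitGeneratedNumber(L, R):
--     # Enumerate repdigits d*(11...1) directly instead of scanning the whole range.
--     total = 0
--     base = 1  # repunit: 1, 11, 111, ...
--     while base < R:
--         for d in range(1, 10):
--             v = d * base
--             if L <= v < R:
--                 total += v
--         base = base * 10 + 1
--     return total
-- ===== Notes on version B (the rewrite author's own statement) =====
-- stated objective: faster
-- what changed: B directly enumerates the repdigits d*(10^k-1)/9 that fall in [L,R) and sums them, instead of scanning every integer in the range and testing its decimal string.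
import Mathlib
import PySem

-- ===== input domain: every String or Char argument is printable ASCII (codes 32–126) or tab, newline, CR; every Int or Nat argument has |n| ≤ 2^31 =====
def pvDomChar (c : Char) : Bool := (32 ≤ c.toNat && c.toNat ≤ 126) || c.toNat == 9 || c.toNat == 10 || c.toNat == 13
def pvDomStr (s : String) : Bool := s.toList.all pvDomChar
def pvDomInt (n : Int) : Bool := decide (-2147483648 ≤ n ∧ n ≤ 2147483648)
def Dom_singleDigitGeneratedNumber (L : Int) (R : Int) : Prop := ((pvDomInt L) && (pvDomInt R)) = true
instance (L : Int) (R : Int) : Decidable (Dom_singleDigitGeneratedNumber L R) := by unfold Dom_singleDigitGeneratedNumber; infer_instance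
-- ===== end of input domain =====

-- B enumerates the repdigits d·(10^k−1)/9 inside [L,R) directly and sums them instead of
-- scanning every integer of the range and testing its decimal string (objective: faster).

-- ===== PORT A =====
def pvIsSingleDigit (number : Int) : Bool :=
  -- number = str(number); for digit in number: numbersList.append(digit)
  let numbersList : List Char :=
    (PySem.Int.toStr number).toList.foldl (fun acc d => acc ++ [d]) []
  -- numbersList[0]: str(n) is never the empty string, so Python's [0] never raises; getD is exact here
  let firstDigit : Char := (PySem.List.pyGet? numbersList 0).getD ' '
  let counter : Int :=
    numbersList.foldl (fun c ch => if ch == firstDigit then c + 1 else c) 0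
  if counter == (numbersList.length : Int) then true else false

def singleDigitGeneratedNumber (L : Int) (R : Int) : Int :=
  let singleDigitNumbers :=
    (PySem.List.pyRange L R).foldl
      (fun acc n => if pvIsSingleDigit n then acc ++ [n] else acc) []
  -- int(x) on an int is the identity
  singleDigitNumbers.foldl (fun total n => total + n) 0

-- ===== PORT B =====
-- while base < R: … ; the extra conjunct 0 < base only establishes termination of the
-- recursion; every reachable base is positive (base starts at 1, step is base*10+1),
-- so the guard never changes the computed value.
def pvAltGo (L : Int) (R : Int) (base : Int) (total : Int) : Int :=
  if _h : 0 < base ∧ base < R then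
    pvAltGo L R (base * 10 + 1)
      ((PySem.List.pyRange 1 10).foldl
        (fun t d => if L ≤ d * base ∧ d * base < R then t + d * base else t) total)
  else total
termination_by (R - base).toNat
decreasing_by omega

def singleDigitGeneratedNumber_alt (L : Int) (R : Int) : Int := pvAltGo L R 1 0

-- ===== PRECONDITION & SPEC =====
def Spec_singleDigitGeneratedNumber (L : Int) (R : Int) (out : Int) : Prop := out = singleDigitGeneratedNumber_alt L R
instance (L : Int) (R : Int) (out : Int) : Decidable (Spec_singleDigitGeneratedNumber L R out) := by unfold Spec_singleDigitGeneratedNumber; infer_instance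

-- ===== CLAIM (what is proved, stated in full; the proofs are below) =====
def Claim_equal_singleDigitGeneratedNumber : Prop := ∀ (L : Int) (R : Int), Dom_singleDigitGeneratedNumber L R → Spec_singleDigitGeneratedNumber L R (singleDigitGeneratedNumber L R)

-- ===== LEMMAS AND PROOFS =====

/-- `0, 1, 11, 111, …` -/
def pvRepunit : Nat → Nat
  | 0 => 0
  | k + 1 => 10 * pvRepunit k + 1

/-- The list of values B's loop adds, in the order it adds them. -/
def pvRepList (L R base : Int) : List Int :=
  if 0 < base ∧ base < R then
    ((PySem.List.pyRange 1 10).filter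
        (fun d => decide (L ≤ d * base ∧ d * base < R))).map (fun d => d * base)
      ++ pvRepList L R (base * 10 + 1)
  else []
termination_by (R - base).toNat
decreasing_by omega

lemma pvRepunit_pos {j : Nat} (h : 1 ≤ j) : 1 ≤ pvRepunit j := by
  cases j with
  | zero => omega
  | succ k => show 1 ≤ 10 * pvRepunit k + 1; omega

lemma pvRepunit_le_of_le {j k : Nat} (h : j ≤ k) : pvRepunit j ≤ pvRepunit k := by
  induction k with
  | zero => simp [Nat.le_zero.mp h]
  | succ m ih =>
    rcases Nat.lt_or_ge j (m + 1) with hlt | hge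
    · have h1 := ih (by omega)
      have h2 : pvRepunit (m + 1) = 10 * pvRepunit m + 1 := rfl
      omega
    · have h2 : j = m + 1 := by omega
      rw [h2]

lemma pvToDigitsCore_eq (b : Nat) (hb : 1 < b) :
    ∀ (f n : Nat) (l : List Char), n ≠ 0 → n ≤ f →
      Nat.toDigitsCore b f n l = ((Nat.digits b n).map Nat.digitChar).reverse ++ l := by
  intro f
  induction f with
  | zero => intro n l hn hf; omega
  | succ f ih =>
    intro n l hn hf
    rw [Nat.toDigitsCore]
    by_cases hdiv : n / b = 0
    · rw [if_pos hdiv, Nat.digits_def' hb (Nat.pos_of_ne_zero hn), hdiv]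
      simp
    · rw [if_neg hdiv, ih (n / b) _ hdiv (by
        have := Nat.div_lt_self (Nat.pos_of_ne_zero hn) hb
        omega)]
      rw [Nat.digits_def' hb (Nat.pos_of_ne_zero hn)]
      simp

lemma pvToChars_of_pos {n : Int} (h : 0 < n) :
    PySem.Int.toChars n = ((Nat.digits 10 n.toNat).map Nat.digitChar).reverse := by
  have hn : n.toNat ≠ 0 := by omega
  rw [PySem.Int.toChars, if_neg (by omega), Nat.toDigits,
    pvToDigitsCore_eq 10 (by omega) _ _ _ hn (by omega), List.append_nil]

lemma pvToChars_of_neg {n : Int} (h : n < 0) :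
    PySem.Int.toChars n = '-' :: ((Nat.digits 10 n.natAbs).map Nat.digitChar).reverse := by
  have hn : n.natAbs ≠ 0 := by omega
  rw [PySem.Int.toChars, if_pos h, Nat.toDigits,
    pvToDigitsCore_eq 10 (by omega) _ _ _ hn (by omega), List.append_nil]

lemma pvDigitChar_inj : ∀ a < 10, ∀ b < 10, Nat.digitChar a = Nat.digitChar b → a = b := by decide

lemma pvDigitChar_ne_dash : ∀ a < 10, Nat.digitChar a ≠ '-' := by decide

/-- `isSingleDigit` asks whether every character equals the first one. -/
lemma pvIsSingleDigit_iff {n : Int} (hne : PySem.Int.toChars n ≠ []) :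
    pvIsSingleDigit n = true ↔ ∀ c ∈ PySem.Int.toChars n, c = (PySem.Int.toChars n).headI := by
  unfold pvIsSingleDigit
  dsimp only
  rw [PySem.Int.toList_toStr, PySem.List.foldl_append_singleton, List.nil_append]
  have hfst : (PySem.List.pyGet? (PySem.Int.toChars n) 0).getD ' ' = (PySem.Int.toChars n).headI := by
    cases h : PySem.Int.toChars n with
    | nil => exact absurd h hne
    | cons a t => simp [PySem.List.pyGet?, PySem.List.pyIdx?]
  rw [hfst, PySem.List.foldl_count_if, zero_add]
  have key : (List.countP (fun ch => ch == (PySem.Int.toChars n).headI) (PySem.Int.toChars n)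
      = (PySem.Int.toChars n).length) ↔ ∀ c ∈ PySem.Int.toChars n, c = (PySem.Int.toChars n).headI := by
    simp [List.countP_eq_length]
  by_cases hq : List.countP (fun ch => ch == (PySem.Int.toChars n).headI) (PySem.Int.toChars n)
      = (PySem.Int.toChars n).length
  · simpa [hq] using key.mp hq
  · have hq' : ¬ ((List.countP (fun ch => ch == (PySem.Int.toChars n).headI) (PySem.Int.toChars n) : Int)
        = ((PySem.Int.toChars n).length : Int)) := by exact_mod_cast hq
    simp only [beq_iff_eq, hq', if_false, Bool.false_eq_true, false_iff]
    exact fun hall => hq (key.mpr hall)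

lemma pvHeadI_mem {α : Type} [Inhabited α] {l : List α} (h : l ≠ []) : l.headI ∈ l := by
  cases l with
  | nil => simp at h
  | cons a t => simp

lemma pvToChars_ne_nil (n : Int) : PySem.Int.toChars n ≠ [] := by
  rcases lt_trichotomy n 0 with h | h | h
  · rw [pvToChars_of_neg h]; simp
  · subst h; decide
  · rw [pvToChars_of_pos h]
    have : n.toNat ≠ 0 := by omega
    simp [Nat.digits_ne_nil_iff_ne_zero, this]

lemma pvIsSingleDigit_neg {n : Int} (h : n < 0) : pvIsSingleDigit n = false := by
  have hm : n.natAbs ≠ 0 := by omega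
  have hcs := pvToChars_of_neg h
  have hne : PySem.Int.toChars n ≠ [] := pvToChars_ne_nil n
  rw [← Bool.not_eq_true]
  intro htrue
  have hall := (pvIsSingleDigit_iff hne).mp htrue
  have hhead : (PySem.Int.toChars n).headI = '-' := by rw [hcs]; rfl
  obtain ⟨a, ha⟩ : ∃ a, a ∈ Nat.digits 10 n.natAbs :=
    List.exists_mem_of_ne_nil _ (Nat.digits_ne_nil_iff_ne_zero.mpr hm)
  have hc : Nat.digitChar a ∈ PySem.Int.toChars n := by
    rw [hcs]
    simp only [List.mem_cons, List.mem_reverse, List.mem_map]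
    exact Or.inr ⟨a, ha, rfl⟩
  have hcontra := hall _ hc
  rw [hhead] at hcontra
  exact pvDigitChar_ne_dash a (Nat.digits_lt_base (by omega) ha) hcontra

lemma pvOfDigits_replicate (k d : Nat) :
    Nat.ofDigits 10 (List.replicate k d) = d * pvRepunit k := by
  induction k with
  | zero => simp [pvRepunit]
  | succ m ih =>
    rw [List.replicate_succ, Nat.ofDigits_cons, ih, pvRepunit]
    ring

lemma pvDigits_repdigit {k d : Nat} (hk : 1 ≤ k) (hd1 : 1 ≤ d) (hd9 : d ≤ 9) :
    Nat.digits 10 (d * pvRepunit k) = List.replicate k d := by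
  induction k with
  | zero => omega
  | succ m ih =>
    by_cases hm : m = 0
    · subst hm
      have h1 : d * pvRepunit 1 = d := by simp [pvRepunit]
      rw [h1, Nat.digits_def' (by omega : (1:Nat) < 10) (by omega),
        Nat.mod_eq_of_lt (by omega), Nat.div_eq_of_lt (by omega)]
      simp
    · have hrec := ih (by omega)
      have hval : d * pvRepunit (m + 1) = 10 * (d * pvRepunit m) + d := by
        rw [pvRepunit]; ring
      have hpos : 0 < d * pvRepunit (m + 1) := by
        have := pvRepunit_pos (j := m + 1) (by omega)
        positivity
      rw [Nat.digits_def' (by omega : (1:Nat) < 10) hpos, hval]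
      have hmod : (10 * (d * pvRepunit m) + d) % 10 = d := by omega
      have hdiv : (10 * (d * pvRepunit m) + d) / 10 = d * pvRepunit m := by omega
      rw [hmod, hdiv, hrec]
      rfl

lemma pvIsSingleDigit_pos_iff {n : Int} (h : 0 < n) :
    pvIsSingleDigit n = true ↔
      ∃ k d : Nat, 1 ≤ k ∧ 1 ≤ d ∧ d ≤ 9 ∧ n = ((d * pvRepunit k : Nat) : Int) := by
  have hm0 : n.toNat ≠ 0 := by omega
  have hcs := pvToChars_of_pos h
  have hne : PySem.Int.toChars n ≠ [] := pvToChars_ne_nil n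
  have hdsne : Nat.digits 10 n.toNat ≠ [] := Nat.digits_ne_nil_iff_ne_zero.mpr hm0
  rw [pvIsSingleDigit_iff hne]
  constructor
  · intro hall
    have hdigeq : ∀ a ∈ Nat.digits 10 n.toNat, ∀ b ∈ Nat.digits 10 n.toNat, a = b := by
      intro a ha b hb
      have hca : Nat.digitChar a ∈ PySem.Int.toChars n := by
        rw [hcs]; simp only [List.mem_reverse, List.mem_map]; exact ⟨a, ha, rfl⟩
      have hcb : Nat.digitChar b ∈ PySem.Int.toChars n := by
        rw [hcs]; simp only [List.mem_reverse, List.mem_map]; exact ⟨b, hb, rfl⟩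
      have heq : Nat.digitChar a = Nat.digitChar b := (hall _ hca).trans (hall _ hcb).symm
      exact pvDigitChar_inj a (Nat.digits_lt_base (by omega) ha)
        b (Nat.digits_lt_base (by omega) hb) heq
    have hdmem := pvHeadI_mem hdsne
    have hrep : Nat.digits 10 n.toNat
        = List.replicate (Nat.digits 10 n.toNat).length (Nat.digits 10 n.toNat).headI :=
      List.eq_replicate_iff.mpr ⟨rfl, fun b hb => hdigeq b hb _ hdmem⟩
    have hmval : n.toNat = (Nat.digits 10 n.toNat).headI * pvRepunit (Nat.digits 10 n.toNat).length := by
      conv_lhs => rw [← Nat.ofDigits_digits 10 n.toNat, hrep]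
      exact pvOfDigits_replicate _ _
    have hd9 : (Nat.digits 10 n.toNat).headI ≤ 9 := by
      have := Nat.digits_lt_base (by omega : (1:Nat) < 10) hdmem
      omega
    have hd1 : 1 ≤ (Nat.digits 10 n.toNat).headI := by
      rcases Nat.eq_zero_or_pos (Nat.digits 10 n.toNat).headI with h0 | h1
      · rw [h0] at hmval; omega
      · exact h1
    refine ⟨(Nat.digits 10 n.toNat).length, (Nat.digits 10 n.toNat).headI,
      List.length_pos_of_ne_nil hdsne, hd1, hd9, ?_⟩
    rw [← hmval]
    omega
  · rintro ⟨k, d, hk, hd1, hd9, hn⟩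
    have hmval : n.toNat = d * pvRepunit k := by omega
    have hchars : PySem.Int.toChars n = List.replicate k (Nat.digitChar d) := by
      rw [hcs, hmval, pvDigits_repdigit hk hd1 hd9, List.map_replicate, List.reverse_replicate]
    intro c hc
    rw [hchars] at hc ⊢
    have hc' := List.eq_of_mem_replicate hc
    cases k with
    | zero => omega
    | succ m => simpa [List.replicate_succ] using hc'

lemma pvA_sum (L R : Int) :
    singleDigitGeneratedNumber L R
      = ((PySem.List.pyRange L R).filter pvIsSingleDigit).sum := by
  unfold singleDigitGeneratedNumber
  dsimp only
  rw [PySem.List.foldl_append_if pvIsSingleDigit (fun n => n), List.nil_append,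
    PySem.List.foldl_add _ (fun n => n), zero_add]
  simp [List.map_id_fun']

lemma pvFoldl_add_if (L R base : Int) :
    ∀ (l : List Int) (t : Int),
      l.foldl (fun t d => if L ≤ d * base ∧ d * base < R then t + d * base else t) t
        = t + ((l.filter (fun d => decide (L ≤ d * base ∧ d * base < R))).map
                (fun d => d * base)).sum := by
  intro l
  induction l with
  | nil => intro t; simp
  | cons a tl ih =>
    intro t
    simp only [List.foldl_cons, List.filter_cons]
    by_cases hp : L ≤ a * base ∧ a * base < R
    · rw [if_pos hp, ih]
      simp only [hp, decide_true, and_self, if_true, List.map_cons, List.sum_cons]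
      ring
    · rw [if_neg hp, ih]
      simp [hp]

lemma pvAltGo_sum (L R : Int) :
    ∀ (base total : Int), pvAltGo L R base total = total + (pvRepList L R base).sum := by
  have H : ∀ (N : Nat) (base total : Int), (R - base).toNat ≤ N →
      pvAltGo L R base total = total + (pvRepList L R base).sum := by
    intro N
    induction N with
    | zero =>
      intro base total hN
      rw [pvAltGo, pvRepList, dif_neg (by omega), if_neg (by omega)]
      simp
    | succ N ih =>
      intro base total hN
      rw [pvAltGo, pvRepList]
      by_cases hg : 0 < base ∧ base < R
      · rw [dif_pos hg, if_pos hg, ih _ _ (by omega), pvFoldl_add_if, List.sum_append]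
        ring
      · rw [dif_neg hg, if_neg hg]; simp
  exact fun base total => H (R - base).toNat base total le_rfl

lemma pvRepList_ge (L R : Int) :
    ∀ (base : Int), 0 < base → ∀ x ∈ pvRepList L R base, base ≤ x := by
  have H : ∀ (N : Nat) (base : Int), (R - base).toNat ≤ N → 0 < base →
      ∀ x ∈ pvRepList L R base, base ≤ x := by
    intro N
    induction N with
    | zero =>
      intro base hN hb x hx
      rw [pvRepList, if_neg (by omega)] at hx
      simp at hx
    | succ N ih =>
      intro base hN hb x hx
      rw [pvRepList] at hx
      by_cases hg : 0 < base ∧ base < R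
      · rw [if_pos hg] at hx
        rcases List.mem_append.mp hx with hrow | hrec
        · simp only [List.mem_map, List.mem_filter, decide_eq_true_eq] at hrow
          obtain ⟨d, ⟨hd, _⟩, hxval⟩ := hrow
          have hd1 : 1 ≤ d := (PySem.List.mem_pyRange_one.mp hd).1
          have := mul_le_mul_of_nonneg_right hd1 (le_of_lt hb)
          omega
        · have := ih (base * 10 + 1) (by omega) (by omega) x hrec
          omega
      · rw [if_neg hg] at hx
        simp at hx
  exact fun base hb x hx => H (R - base).toNat base le_rfl hb x hx

lemma pvRepList_pairwise (L R : Int) :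
    ∀ (base : Int), 0 < base → (pvRepList L R base).Pairwise (· < ·) := by
  have H : ∀ (N : Nat) (base : Int), (R - base).toNat ≤ N → 0 < base →
      (pvRepList L R base).Pairwise (· < ·) := by
    intro N
    induction N with
    | zero =>
      intro base hN hb
      rw [pvRepList, if_neg (by omega)]
      exact List.Pairwise.nil
    | succ N ih =>
      intro base hN hb
      rw [pvRepList]
      by_cases hg : 0 < base ∧ base < R
      · rw [if_pos hg]
        rw [List.pairwise_append]
        refine ⟨?_, ih (base * 10 + 1) (by omega) (by omega), ?_⟩
        · rw [List.pairwise_map]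
          exact ((PySem.List.pairwise_lt_pyRange_one 1 10).filter _).imp
            (fun hlt => mul_lt_mul_of_pos_right hlt hb)
        · intro a ha y hy
          simp only [List.mem_map, List.mem_filter, decide_eq_true_eq] at ha
          obtain ⟨d, ⟨hd, _⟩, haval⟩ := ha
          have hd9 : d < 10 := (PySem.List.mem_pyRange_one.mp hd).2
          have hya := pvRepList_ge L R (base * 10 + 1) (by omega) y hy
          have : d * base ≤ 9 * base := mul_le_mul_of_nonneg_right (by omega) (le_of_lt hb)
          omega
      · rw [if_neg hg]
        exact List.Pairwise.nil
  exact fun base hb => H (R - base).toNat base le_rfl hb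

lemma pvRepList_mem (L R : Int) :
    ∀ (j : Nat), 1 ≤ j → ∀ (x : Int),
      (x ∈ pvRepList L R ((pvRepunit j : Nat) : Int) ↔
        ∃ k d : Nat, j ≤ k ∧ 1 ≤ d ∧ d ≤ 9 ∧
          x = ((d * pvRepunit k : Nat) : Int) ∧ L ≤ x ∧ x < R) := by
  have H : ∀ (N : Nat) (j : Nat), (R - ((pvRepunit j : Nat) : Int)).toNat ≤ N → 1 ≤ j → ∀ (x : Int),
      (x ∈ pvRepList L R ((pvRepunit j : Nat) : Int) ↔
        ∃ k d : Nat, j ≤ k ∧ 1 ≤ d ∧ d ≤ 9 ∧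
          x = ((d * pvRepunit k : Nat) : Int) ∧ L ≤ x ∧ x < R) := by
    intro N
    induction N with
    | zero =>
      intro j hN hj x
      rw [pvRepList, if_neg (by omega)]
      simp only [List.not_mem_nil, false_iff, not_exists]
      rintro k d ⟨hk, hd1, hd9, hx, hL, hR⟩
      have h1 : pvRepunit j ≤ pvRepunit k := pvRepunit_le_of_le hk
      have h2 : pvRepunit k ≤ d * pvRepunit k := Nat.le_mul_of_pos_left _ (by omega)
      omega
    | succ N ih =>
      intro j hN hj x
      rw [pvRepList]
      have hbpos : (0:Int) < ((pvRepunit j : Nat) : Int) := by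
        have := pvRepunit_pos hj; omega
      by_cases hg : ((pvRepunit j : Nat) : Int) < R
      · rw [if_pos ⟨hbpos, hg⟩]
        have hnext : ((pvRepunit j : Nat) : Int) * 10 + 1 = ((pvRepunit (j + 1) : Nat) : Int) := by
          show _ = ((10 * pvRepunit j + 1 : Nat) : Int)
          push_cast
          ring
        rw [List.mem_append, hnext, ih (j + 1) (by
            have : pvRepunit j < pvRepunit (j + 1) := by
              have : pvRepunit (j + 1) = 10 * pvRepunit j + 1 := rfl
              omega
            omega) (by omega) x]
        constructor
        · rintro (hrow | ⟨k, d, hk, hd1, hd9, hx, hL, hR⟩)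
          · simp only [List.mem_map, List.mem_filter, decide_eq_true_eq] at hrow
            obtain ⟨d, ⟨hd, hrange⟩, hxval⟩ := hrow
            obtain ⟨hd1, hd10⟩ := PySem.List.mem_pyRange_one.mp hd
            refine ⟨j, d.toNat, le_refl j, by omega, by omega, ?_, by omega, by omega⟩
            push_cast
            rw [Int.toNat_of_nonneg (by omega)]
            omega
          · exact ⟨k, d, by omega, hd1, hd9, hx, hL, hR⟩
        · rintro ⟨k, d, hk, hd1, hd9, hx, hL, hR⟩
          rcases Nat.eq_or_lt_of_le hk with hkj | hkj
          · left
            simp only [List.mem_map, List.mem_filter, decide_eq_true_eq]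
            refine ⟨(d : Int), ⟨PySem.List.mem_pyRange_one.mpr ⟨by omega, by omega⟩, ?_⟩, ?_⟩
            · have hxd : x = (d : Int) * ((pvRepunit j : Nat) : Int) := by
                rw [hx, hkj]; push_cast; ring
              rw [← hxd]
              exact ⟨hL, hR⟩
            · rw [hx, hkj]; push_cast; ring
          · right
            exact ⟨k, d, by omega, hd1, hd9, hx, hL, hR⟩
      · rw [if_neg (by omega)]
        simp only [List.not_mem_nil, false_iff, not_exists]
        rintro k d ⟨hk, hd1, hd9, hx, hL, hR⟩
        have h1 : pvRepunit j ≤ pvRepunit k := pvRepunit_le_of_le hk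
        have h2 : pvRepunit k ≤ d * pvRepunit k := Nat.le_mul_of_pos_left _ (by omega)
        omega
  exact fun j hj x => H (R - ((pvRepunit j : Nat) : Int)).toNat j le_rfl hj x

lemma pvSum_filter_ne_zero : ∀ l : List Int, (l.filter (fun x => x != 0)).sum = l.sum := by
  intro l
  induction l with
  | nil => rfl
  | cons a t ih =>
    by_cases ha : a = 0
    · subst ha; simpa using ih
    · simp [ha, ih]

lemma pvMain (L R : Int) :
    ((PySem.List.pyRange L R).filter pvIsSingleDigit).sum = (pvRepList L R 1).sum := by
  rw [← pvSum_filter_ne_zero ((PySem.List.pyRange L R).filter pvIsSingleDigit)]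
  apply List.Perm.sum_eq
  have hone : ((pvRepunit 1 : Nat) : Int) = 1 := rfl
  apply (List.perm_ext_iff_of_nodup
    (((PySem.List.nodup_pyRange_one L R).filter _).filter _)
    ((pvRepList_pairwise L R 1 one_pos).imp ne_of_lt)).mpr
  intro x
  have hmem := pvRepList_mem L R 1 le_rfl x
  rw [hone] at hmem
  rw [hmem]
  simp only [List.mem_filter, PySem.List.mem_pyRange_one, bne_iff_ne, ne_eq]
  constructor
  · rintro ⟨⟨⟨hL, hR⟩, hsd⟩, hx0⟩
    rcases lt_trichotomy x 0 with hneg | hzero | hpos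
    · rw [pvIsSingleDigit_neg hneg] at hsd
      exact absurd hsd (by simp)
    · exact absurd hzero hx0
    · obtain ⟨k, d, hk, hd1, hd9, hx⟩ := (pvIsSingleDigit_pos_iff hpos).mp hsd
      exact ⟨k, d, hk, hd1, hd9, hx, hL, hR⟩
  · rintro ⟨k, d, hk, hd1, hd9, hx, hL, hR⟩
    have hpos : 0 < x := by
      have h1 : 1 ≤ pvRepunit k := pvRepunit_pos (by omega)
      have h2 : 1 * 1 ≤ d * pvRepunit k := Nat.mul_le_mul hd1 h1
      omega
    exact ⟨⟨⟨hL, hR⟩, (pvIsSingleDigit_pos_iff hpos).mpr ⟨k, d, hk, hd1, hd9, hx⟩⟩, by omega⟩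

-- ===== VERDICT (by name: the statement is the Claim_ definition above) =====
theorem singleDigitGeneratedNumber_spec : Claim_equal_singleDigitGeneratedNumber := by
  intro L R _
  show _ = _
  rw [pvA_sum, pvMain, singleDigitGeneratedNumber_alt, pvAltGo_sum, zero_add]
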